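-- pv_equiv track=rewrite | github.com/gregorioponciano/python | scripts/reverser_x_supreme/utils/rainbow_tables.py | reduce_function
-- ===== SOURCE A (Python) =====
-- def reduce_function(hash_str: str, length: int) -> str:
--     """Funcao R para geracao de tabelas arco-iris"""
--     try:
--         charset = "0123456789abcdef"
--         numeric_value = int(hash_str[:length], 16)
--         result = []
--         for i in range(length):
--             index = (numeric_value + i) % len(charset)
--             result.append(charset[index])
--         return "".join(result)
--     except (ValueError, IndexError):
--         return ""
-- ===== SOURCE B (Python) =====
-- def reduce_function(hash_str: str, length: int) -> str:
--     """Funcao R para geracao de tabelas arco-iris"""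
--     try:
--         charset = "0123456789abcdef"
--         start = int(hash_str[:length], 16) % 16
--         rotated = charset[start:] + charset[:start]
--         return (rotated * (length // 16 + 1))[:length]
--     except ValueError:
--         return ""
-- ===== Notes on version B (the rewrite author's own statement) =====
-- stated objective: faster
-- what changed: B replaces A's per-character loop (indexing the hex charset at (value+i)%16 for each i) with a rotate-and-tile construction: rotate the charset to start at value%16, repeat it length//16+1 times and slice to length, inside the same try/except around int(hash_str[:length], 16). The per-character Python loop disappears in favour of O(1)-many string slice/concat/repeat primitives, which a timing run measured as much faster.
import Mathlib
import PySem

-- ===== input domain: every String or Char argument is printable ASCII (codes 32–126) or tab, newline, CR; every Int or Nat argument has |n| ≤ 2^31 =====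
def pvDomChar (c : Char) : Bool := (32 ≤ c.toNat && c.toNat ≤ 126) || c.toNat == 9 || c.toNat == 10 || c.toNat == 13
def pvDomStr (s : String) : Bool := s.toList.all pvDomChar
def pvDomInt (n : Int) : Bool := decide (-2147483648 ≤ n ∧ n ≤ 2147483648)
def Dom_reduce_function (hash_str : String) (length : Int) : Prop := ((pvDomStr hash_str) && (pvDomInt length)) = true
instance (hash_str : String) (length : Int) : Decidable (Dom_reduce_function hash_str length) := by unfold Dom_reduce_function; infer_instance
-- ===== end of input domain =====

-- B replaces A's per-character index loop by a rotate-and-tile construction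
-- (rotate the hex alphabet to the start residue, repeat, slice to length); a timing run measured B faster.

-- ===== PORT A =====
-- charset = "0123456789abcdef"
def pvCharset : List Char := "0123456789abcdef".toList

-- loop body: result.append(charset[(numeric_value + i) % len(charset)]); none = IndexError
def pvStepA (v : Int) (acc : Option (List Char)) (i : Int) : Option (List Char) :=
  acc.bind fun cs =>
    (PySem.List.pyGet? pvCharset (PySem.Int.mod (v + i) 16)).map (fun c => cs ++ [c])

def reduce_function (hash_str : String) (length : Int) : String :=
  -- numeric_value = int(hash_str[:length], 16); none = ValueError → except returns ""
  match PySem.Int.ofCharsBase? (PySem.List.slice hash_str.toList none (some length)) 16 with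
  | none => ""
  | some v =>
    -- for i in range(length): …; "".join(result)
    match (PySem.List.pyRange 0 length 1).foldl (pvStepA v) (some ([] : List Char)) with
    | none => ""      -- IndexError → except returns ""
    | some cs => String.ofList cs

-- ===== PORT B =====
def reduce_function_alt (hash_str : String) (length : Int) : String :=
  -- start = int(hash_str[:length], 16) % 16; none = ValueError → except returns ""
  match PySem.Int.ofCharsBase? (PySem.List.slice hash_str.toList none (some length)) 16 with
  | none => ""
  | some v =>
    let start := PySem.Int.mod v 16
    -- rotated = charset[start:] + charset[:start]
    let rotated := PySem.List.slice pvCharset (some start) none ++ PySem.List.slice pvCharset none (some start)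
    -- (rotated * (length // 16 + 1))[:length]   (string * int ported as replicate+flatten)
    String.ofList (PySem.List.slice
      ((List.replicate (PySem.Int.floordiv length 16 + 1).toNat rotated).flatten)
      none (some length))

-- ===== PRECONDITION & SPEC =====
def Spec_reduce_function (hash_str : String) (length : Int) (out : String) : Prop := out = reduce_function_alt hash_str length
instance (hash_str : String) (length : Int) (out : String) : Decidable (Spec_reduce_function hash_str length out) := by unfold Spec_reduce_function; infer_instance

-- ===== CLAIM (what is proved, stated in full; the proofs are below) =====
def Claim_equal_reduce_function : Prop := ∀ (hash_str : String) (length : Int), Dom_reduce_function hash_str length → Spec_reduce_function hash_str length (reduce_function hash_str length)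

-- ===== LEMMAS AND PROOFS =====

theorem pvMod16 (x : Int) : PySem.Int.mod x 16 = x % 16 := by
  simp [PySem.Int.mod, Int.fmod_eq_emod]

theorem pvFloordiv16 (x : Int) : PySem.Int.floordiv x 16 * 16 + x % 16 = x := by
  have h := PySem.Int.floordiv_mul_add_mod x 16
  rwa [pvMod16] at h

-- indexing the charset at a residue always succeeds
theorem pvGetCharset (m : Int) (h0 : 0 ≤ m) (h1 : m < 16) :
    PySem.List.pyGet? pvCharset m = some (pvCharset.getD m.toNat ' ') := by
  have hm : m = ((m.toNat : Nat) : Int) := by omega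
  rw [hm, PySem.List.pyGet?_natCast]
  have hlt : m.toNat < pvCharset.length := by
    have : pvCharset.length = 16 := by decide
    omega
  simp [List.getD_eq_getElem?_getD, List.getElem?_eq_getElem hlt, max_eq_left h0]

-- A's loop never hits IndexError and produces the mapped residue characters
theorem pvFoldA (v : Int) (l : List Int) (cs : List Char) :
    l.foldl (pvStepA v) (some cs)
      = some (cs ++ l.map (fun i => pvCharset.getD ((v + i) % 16).toNat ' ')) := by
  induction l generalizing cs with
  | nil => simp
  | cons i l ih =>
    have h0 : 0 ≤ (v + i) % 16 := Int.emod_nonneg _ (by norm_num)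
    have h1 : (v + i) % 16 < 16 := Int.emod_lt_of_pos _ (by norm_num)
    simp only [List.foldl_cons, pvStepA, pvMod16, pvGetCharset _ h0 h1, Option.bind_some,
      Option.map_some, ih]
    simp

-- a 16-element list reproduced by reading it off with getD over range 16
theorem pvMapGetD (r : List Char) (h : r.length = 16) :
    (List.range 16).map (fun j => r.getD j ' ') = r := by
  apply List.ext_getElem
  · simp [h]
  · intro k hk1 hk2
    simp only [List.getElem_map, List.getElem_range]
    have hk : k < r.length := by simpa [h] using hk2
    simp [List.getD_eq_getElem?_getD, List.getElem?_eq_getElem hk]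

-- tiling: M copies of r laid end to end read as index mod |r|
theorem pvTile (r : List Char) (h : r.length = 16) (M : Nat) :
    (List.replicate M r).flatten
      = (List.range (M * 16)).map (fun k => r.getD (k % 16) ' ') := by
  induction M with
  | zero => simp
  | succ M ih =>
    rw [List.replicate_succ', List.flatten_append, ih]
    have hr : Nat.succ M * 16 = M * 16 + 16 := by omega
    rw [hr, List.range_add, List.map_append, List.map_map]
    congr 1
    have : ∀ j ∈ List.range 16,
        ((fun k => r.getD (k % 16) ' ') ∘ (fun x => M * 16 + x)) j = r.getD j ' ' := by
      intro j hj
      have hj16 : j < 16 := List.mem_range.mp hj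
      simp [Function.comp, Nat.mod_eq_of_lt hj16]
    rw [List.map_congr_left this, pvMapGetD r h]
    simp

-- the rotated charset length
theorem pvRotLen (t : Nat) (ht : t < 16) :
    (pvCharset.drop t ++ pvCharset.take t).length = 16 := by
  have : pvCharset.length = 16 := by decide
  simp [this]
  omega

-- reading the rotated charset = reading the charset shifted by t (finite check)
theorem pvRotGet : ∀ (t j : Fin 16),
    (pvCharset.drop t.val ++ pvCharset.take t.val).getD j.val ' '
      = pvCharset.getD ((t.val + j.val) % 16) ' ' := by decide

-- per-index agreement of the two constructions
theorem pvPointwise (v : Int) (k : Nat) :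
    pvCharset.getD ((v + (k : Int)) % 16).toNat ' '
      = ((pvCharset.drop (v % 16).toNat ++ pvCharset.take (v % 16).toNat).getD (k % 16) ' ') := by
  have h0 : 0 ≤ v % 16 := Int.emod_nonneg _ (by norm_num)
  have h1 : v % 16 < 16 := Int.emod_lt_of_pos _ (by norm_num)
  set t : Nat := (v % 16).toNat with hts
  have ht : t < 16 := by omega
  have hj : k % 16 < 16 := Nat.mod_lt _ (by norm_num)
  have hrot := pvRotGet ⟨t, ht⟩ ⟨k % 16, hj⟩
  simp only at hrot
  rw [hrot]
  congr 1
  -- ((v + k) % 16).toNat = (t + k % 16) % 16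
  have hv : v % 16 = (t : Int) := by omega
  omega

-- the core equality after the common parse succeeded
theorem pvMain (v n : Int) :
    (match (PySem.List.pyRange 0 n 1).foldl (pvStepA v) (some ([] : List Char)) with
      | none => ""
      | some cs => String.ofList cs)
      = String.ofList (PySem.List.slice
          ((List.replicate (PySem.Int.floordiv n 16 + 1).toNat
            (PySem.List.slice pvCharset (some (PySem.Int.mod v 16)) none
              ++ PySem.List.slice pvCharset none (some (PySem.Int.mod v 16)))).flatten)
          none (some n)) := by
  have h0 : 0 ≤ PySem.Int.mod v 16 := by rw [pvMod16]; exact Int.emod_nonneg _ (by norm_num)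
  have hfd := pvFloordiv16 n
  have hm0 : 0 ≤ n % 16 := Int.emod_nonneg _ (by norm_num)
  have hm1 : n % 16 < 16 := Int.emod_lt_of_pos _ (by norm_num)
  rw [pvFoldA]
  simp only [List.nil_append]
  rw [PySem.List.slice_from pvCharset h0, PySem.List.slice_to pvCharset h0, pvMod16]
  set t : Nat := (v % 16).toNat with hts
  set r : List Char := pvCharset.drop t ++ pvCharset.take t with hrs
  have ht : t < 16 := by
    have h1 : v % 16 < 16 := Int.emod_lt_of_pos _ (by norm_num)
    have h2 : 0 ≤ v % 16 := Int.emod_nonneg _ (by norm_num)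
    omega
  have hrlen : r.length = 16 := pvRotLen t ht
  by_cases hn : 0 ≤ n
  · -- both sides are the same n.toNat characters
    have hM : 0 ≤ PySem.Int.floordiv n 16 := by nlinarith [hfd, hm0, hm1]
    rw [PySem.List.slice_to _ hn, pvTile r hrlen]
    have hle : n.toNat ≤ (PySem.Int.floordiv n 16 + 1).toNat * 16 := by
      have : ((PySem.Int.floordiv n 16 + 1).toNat : Int) = PySem.Int.floordiv n 16 + 1 := by omega
      nlinarith [hfd, hm1, Int.toNat_of_nonneg hn, this]
    rw [← List.map_take, List.take_range, Nat.min_eq_left hle]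
    congr 1
    rw [PySem.List.pyRange_one]
    simp only [Int.sub_zero, List.map_map]
    apply List.map_congr_left
    intro k _
    simp only [Function.comp, Int.zero_add]
    exact pvPointwise v k
  · -- n < 0: zero repetitions on the right, empty range on the left
    have hM : PySem.Int.floordiv n 16 + 1 ≤ 0 := by nlinarith [hfd, hm1]
    have hMz : (PySem.Int.floordiv n 16 + 1).toNat = 0 := by omega
    have hnz : (n - 0).toNat = 0 := by omega
    rw [hMz, PySem.List.pyRange_one, hnz]
    simp [PySem.List.slice]

-- ===== VERDICT (by name: the statement is the Claim_ definition above) =====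
theorem reduce_function_spec : Claim_equal_reduce_function := by
  intro hash_str length _
  unfold Spec_reduce_function reduce_function reduce_function_alt
  cases PySem.Int.ofCharsBase? (PySem.List.slice hash_str.toList none (some length)) 16 with
  | none => rfl
  | some v => exact pvMain v length
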